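-- pv_equiv track=rewrite | github.com/pypi-data/pypi-mirror-285 | packages/lightworks/lightworks-1.5.0.tar.gz/lightworks-1.5.0/lightworks/qubit/converter/qiskit_convert.py | convert_two_qubits_to_adjacent
-- ===== SOURCE A (Python) =====
-- def convert_two_qubits_to_adjacent(q0: int, q1: int) -> tuple[int, int, list]:
--     """
--     Takes two qubit indices and converts these so that they are adjacent to each
--     other, and determining the swaps required for this. The order of the two
--     qubits is preserved, so if q0 > q1 then this will remain True.
--     """
--     if abs(q1 - q0) == 1:
--         return (q0, q1, [])
--     swaps = []
--     new_upper = max(q0, q1)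
--     new_lower = min(q0, q1)
--     while new_upper - new_lower != 1:
--         new_upper -= 1
--         if new_upper - new_lower == 1:
--             break
--         new_lower += 1
--     if min(q0, q1) != new_lower:
--         swaps.append((min(q0, q1), new_lower))
--     if max(q0, q1) != new_upper:
--         swaps.append((max(q0, q1), new_upper))
--     if q0 < q1:
--         q0, q1 = new_lower, new_upper
--     else:
--         q0, q1 = new_upper, new_lower
--     return (q0, q1, swaps)
-- ===== SOURCE B (Python) =====
-- def convert_two_qubits_to_adjacent(q0: int, q1: int) -> tuple[int, int, list]:
--     """O(1) arithmetic version: the loop in A moves the upper qubit down by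
--     ceil((d-1)/2) and the lower qubit up by floor((d-1)/2), where d = |q1-q0|."""
--     lower, upper = min(q0, q1), max(q0, q1)
--     k = upper - lower - 1          # number of steps the loop distributes
--     new_lower = lower + k // 2
--     new_upper = upper - (k - k // 2)
--     swaps = []
--     if lower != new_lower:
--         swaps.append((lower, new_lower))
--     if upper != new_upper:
--         swaps.append((upper, new_upper))
--     if q0 < q1:
--         return (new_lower, new_upper, swaps)
--     return (new_upper, new_lower, swaps)
-- ===== Notes on version B (the rewrite author's own statement) =====
-- stated objective: faster
-- what changed: Replaces A's step-by-step while loop that walks the two qubits toward each other by a closed-form computation of the meeting point (upper - ceil((d-1)/2), lower + floor((d-1)/2)).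
-- outside the precondition, e.g. on convert_two_qubits_to_adjacent(3, 3): A does not finish within the time limit, B returns (3, 2, [(3, 2)])
import Mathlib
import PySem

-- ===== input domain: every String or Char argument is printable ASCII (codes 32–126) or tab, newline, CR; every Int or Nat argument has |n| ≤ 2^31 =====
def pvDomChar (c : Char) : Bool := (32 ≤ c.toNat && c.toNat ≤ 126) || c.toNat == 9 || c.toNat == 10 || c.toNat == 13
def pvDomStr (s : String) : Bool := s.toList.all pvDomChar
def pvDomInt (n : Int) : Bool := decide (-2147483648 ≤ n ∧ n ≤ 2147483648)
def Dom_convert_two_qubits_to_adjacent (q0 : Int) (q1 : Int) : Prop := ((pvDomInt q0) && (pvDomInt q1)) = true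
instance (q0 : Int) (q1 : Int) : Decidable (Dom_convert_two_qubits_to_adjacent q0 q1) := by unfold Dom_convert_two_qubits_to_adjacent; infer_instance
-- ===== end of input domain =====

-- B replaces A's step-by-step meeting loop by the closed-form meeting point
-- (upper moves down ceil((d-1)/2), lower moves up floor((d-1)/2)): O(1) vs O(|q1-q0|).


-- ===== PORT A =====
-- A's while loop, fuel-bounded: fuel (upper-lower).toNat is enough for every
-- input A terminates on (q0 ≠ q1); running out of fuel only happens outside Pre_.
def pvLoopA : Nat → Int → Int → Int × Int
  | 0, u, l => (u, l)
  | n + 1, u, l =>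
    if u - l ≠ 1 then
      let u' := u - 1
      if u' - l = 1 then (u', l) else pvLoopA n u' (l + 1)
    else (u, l)

def convert_two_qubits_to_adjacent (q0 : Int) (q1 : Int) : Int × Int × (List (Int × Int)) :=
  if |q1 - q0| = 1 then (q0, q1, [])
  else
    let hi := max q0 q1
    let lo := min q0 q1
    let r := pvLoopA (hi - lo).toNat hi lo
    let new_upper := r.1
    let new_lower := r.2
    let swaps : List (Int × Int) :=
      (if lo ≠ new_lower then [(lo, new_lower)] else []) ++
      (if hi ≠ new_upper then [(hi, new_upper)] else [])
    if q0 < q1 then (new_lower, new_upper, swaps) else (new_upper, new_lower, swaps)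

-- ===== PORT B =====
def convert_two_qubits_to_adjacent_alt (q0 : Int) (q1 : Int) : Int × Int × (List (Int × Int)) :=
  let lower := min q0 q1
  let upper := max q0 q1
  let k := upper - lower - 1
  let new_lower := lower + PySem.Int.floordiv k 2
  let new_upper := upper - (k - PySem.Int.floordiv k 2)
  let swaps : List (Int × Int) :=
    (if lower ≠ new_lower then [(lower, new_lower)] else []) ++
    (if upper ≠ new_upper then [(upper, new_upper)] else [])
  if q0 < q1 then (new_lower, new_upper, swaps) else (new_upper, new_lower, swaps)

-- ===== PRECONDITION & SPEC =====
-- Pre_ excludes exactly q0 = q1, on which A's while loop never terminates (A diverges).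
def Pre_convert_two_qubits_to_adjacent (q0 : Int) (q1 : Int) : Prop := q0 ≠ q1
instance (q0 : Int) (q1 : Int) : Decidable (Pre_convert_two_qubits_to_adjacent q0 q1) := by unfold Pre_convert_two_qubits_to_adjacent; infer_instance
def pvWitness_convert_two_qubits_to_adjacent : Int × Int := (0, 5)

def Spec_convert_two_qubits_to_adjacent (q0 : Int) (q1 : Int) (out : Int × Int × (List (Int × Int))) : Prop := out = convert_two_qubits_to_adjacent_alt q0 q1
instance (q0 : Int) (q1 : Int) (out : Int × Int × (List (Int × Int))) : Decidable (Spec_convert_two_qubits_to_adjacent q0 q1 out) := by unfold Spec_convert_two_qubits_to_adjacent; infer_instance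

-- ===== CLAIM (what is proved, stated in full; the proofs are below) =====
def Claim_equal_convert_two_qubits_to_adjacent : Prop := ∀ (q0 : Int) (q1 : Int), Dom_convert_two_qubits_to_adjacent q0 q1 → Pre_convert_two_qubits_to_adjacent q0 q1 → Spec_convert_two_qubits_to_adjacent q0 q1 (convert_two_qubits_to_adjacent q0 q1)

-- ===== LEMMAS AND PROOFS =====

-- The loop's closed form: with u - l = k + 1 and enough fuel, the loop returns
-- (u - (k - k/2), l + k/2).
theorem pvLoopA_closed (fuel k : Nat) (u l : Int)
    (hd : u - l = (k : Int) + 1) (hf : k + 1 ≤ fuel) :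
    pvLoopA fuel u l = (u - ((k : Int) - (k / 2 : Nat)), l + (k / 2 : Nat)) := by
  induction fuel generalizing u l k with
  | zero => omega
  | succ n ih =>
    by_cases h1 : u - l = 1
    · have hk : k = 0 := by omega
      subst hk
      simp [pvLoopA, h1]
    · by_cases h2 : u - 1 - l = 1
      · have hk : k = 1 := by omega
        subst hk
        norm_num [pvLoopA, h1, h2]
      · have hk2 : 2 ≤ k := by omega
        have step : pvLoopA (n + 1) u l = pvLoopA n (u - 1) (l + 1) := by
          simp [pvLoopA, h1, h2]
        rw [step, ih (k := k - 2) (u - 1) (l + 1) (by omega) (by omega),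
          Prod.mk.injEq]
        have : (k - 2) / 2 = k / 2 - 1 := by omega
        constructor <;> (push_cast [this]; omega)

theorem convert_two_qubits_to_adjacent_eq (q0 q1 : Int) (hne : q0 ≠ q1) :
    convert_two_qubits_to_adjacent q0 q1 = convert_two_qubits_to_adjacent_alt q0 q1 := by
  set lo := min q0 q1 with hlo
  set hi := max q0 q1 with hhi
  have hlt : lo < hi := by
    rcases lt_or_gt_of_ne hne with h | h
    · simp [hlo, hhi]; omega
    · simp [hlo, hhi]; omega
  set k : Nat := (hi - lo - 1).toNat with hk
  have hdk : hi - lo = (k : Int) + 1 := by omega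
  have hfloor : PySem.Int.floordiv (k : Int) 2 = ((k / 2 : Nat) : Int) := by
    exact_mod_cast PySem.Int.floordiv_natCast k 2
  have hloop : pvLoopA (hi - lo).toNat hi lo
      = (hi - ((k : Int) - (k / 2 : Nat)), lo + (k / 2 : Nat)) :=
    pvLoopA_closed _ k hi lo hdk (by omega)
  have hkk : hi - lo - 1 = (k : Int) := by omega
  unfold convert_two_qubits_to_adjacent convert_two_qubits_to_adjacent_alt
  rw [← hlo, ← hhi]
  simp only [hkk, hfloor, hloop]
  by_cases hadj : |q1 - q0| = 1
  · -- adjacent case: k = 0, both sides are (q0, q1, [])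
    have hk0 : k = 0 := by
      rcases abs_cases (q1 - q0) with ⟨h, _⟩ | ⟨h, _⟩ <;> omega
    simp only [if_pos hadj, hk0]
    have h2 : hi - ((0:Int) - ((0:Nat):Int)) = hi := by push_cast; ring
    rcases lt_or_gt_of_ne hne with h | h
    · have : lo = q0 ∧ hi = q1 := by constructor <;> simp [hlo, hhi] <;> omega
      simp [this.1, this.2, h]
    · have : lo = q1 ∧ hi = q0 := by constructor <;> simp [hlo, hhi] <;> omega
      simp [this.1, this.2, not_lt.mpr (le_of_lt h)]
  · simp only [if_neg hadj]

-- ===== VERDICT (by name: the statement is the Claim_ definition above) =====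
theorem convert_two_qubits_to_adjacent_spec : Claim_equal_convert_two_qubits_to_adjacent := by
  intro q0 q1 _ hpre
  unfold Spec_convert_two_qubits_to_adjacent
  exact convert_two_qubits_to_adjacent_eq q0 q1 hpre
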